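-- pv_equiv track=rewrite | github.com/rahul-m-patel/Locality-Sensitive-Hashing | minhash.py | make_shingles
-- ===== SOURCE A (Python) =====
-- def make_shingles(doc,shingles,k,docid):
--     doc = doc.lower()
--     # removing spaces between words
--     tokens = doc.split(' ')
--     doc = ''.join(tokens)
--     # making shingles
--     for i in range(len(doc)):
--         shingle = doc[i:i+k:1] # slicing 'k' characters
--         if len(shingle) == k and shingle not in shingles:
--             shingles[shingle] = [docid] # list of documents which contain the shingle
--         elif len(shingle) == k and shingle in shingles:
--             postinglist = shingles[shingle]
--             if docid not in postinglist:
--                 postinglist.append(docid)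
--     return shingles
-- ===== SOURCE B (Python) =====
-- def make_shingles(doc, shingles, k, docid):
--     # Returns a NEW index (A updates `shingles` in place; the returned value is the same).
--     doc = ''.join(doc.lower().split(' '))
--     # pass 1: the distinct length-k shingles of the document, in first-occurrence order
--     seen = set()
--     distinct = []
--     for i in range(len(doc)):
--         sh = doc[i:i + k]
--         if len(sh) == k and sh not in seen:
--             seen.add(sh)
--             distinct.append(sh)
--     # pass 2: rebuild the whole index functionally: extend every existing posting list
--     # whose key occurs in the document, then append the brand-new shingles at the end
--     result = {key: (lst + [docid] if key in seen and docid not in lst else lst)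
--               for key, lst in shingles.items()}
--     for sh in distinct:
--         if sh not in shingles:
--             result[sh] = [docid]
--     return result
-- ===== Notes on version B (the rewrite author's own statement) =====
-- stated objective: alternative
-- what changed: A threads the index dict through the character scan, updating it at every position; B never updates the index during the scan: it first collects the distinct length-k shingles with a seen-set, then rebuilds the whole index functionally as a dict comprehension over the old entries (extending each posting list whose key occurs in the document) plus the brand-new shingles appended at the end, returning a new dict instead of mutating the argument.
import Mathlib
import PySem

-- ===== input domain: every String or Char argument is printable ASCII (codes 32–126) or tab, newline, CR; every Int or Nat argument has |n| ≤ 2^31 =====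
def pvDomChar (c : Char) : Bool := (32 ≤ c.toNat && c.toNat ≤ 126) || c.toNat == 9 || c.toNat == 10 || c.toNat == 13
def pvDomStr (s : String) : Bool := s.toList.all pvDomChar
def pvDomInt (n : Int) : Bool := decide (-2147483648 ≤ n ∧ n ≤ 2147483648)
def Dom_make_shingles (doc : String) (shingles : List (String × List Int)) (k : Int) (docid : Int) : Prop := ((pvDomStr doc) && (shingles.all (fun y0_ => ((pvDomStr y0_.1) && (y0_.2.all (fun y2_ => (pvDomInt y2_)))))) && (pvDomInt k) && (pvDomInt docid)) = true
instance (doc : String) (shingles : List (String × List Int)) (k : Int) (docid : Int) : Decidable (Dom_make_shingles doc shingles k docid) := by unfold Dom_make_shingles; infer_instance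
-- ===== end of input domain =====

-- B never updates the index during the scan: it collects the distinct length-k shingles with a
-- seen-set, then rebuilds the whole index functionally (comprehension over the old entries plus
-- the new shingles appended); A mutates `shingles` in place, B returns a new dict — the theorems
-- below are about the returned value ('alternative' objective, same cost).

-- ===== PORT A =====
-- loop body of A: per position, the len==k test and the dict update
def msStepA (k docid : Int) (d : PySem.Dict String (List Int)) (sh : String) : PySem.Dict String (List Int) :=
  if PySem.Str.len sh == k && !(d.contains sh) then
    d.insert sh [docid]
  else if PySem.Str.len sh == k && d.contains sh then
    let postinglist := d.getD sh []          -- present, so default never used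
    if !(postinglist.contains docid) then d.insert sh (postinglist ++ [docid]) else d
  else d

def make_shingles (doc : String) (shingles : List (String × List Int)) (k : Int) (docid : Int) : List (String × List Int) :=
  let dl := PySem.Str.lower doc
  let tokens := (PySem.Str.split? dl " ").getD []   -- sep " " ≠ "" so split? is never none
  let doc2 := PySem.Str.join "" tokens
  -- doc2[i:i+k:1] with step 1 is the plain slice doc2[i:i+k]
  ((PySem.List.pyRange 0 (PySem.Str.len doc2) 1).foldl
    (fun d i => msStepA k docid d (PySem.Str.slice doc2 (some i) (some (i + k))))
    (PySem.Dict.mk shingles)).items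

-- ===== PORT B =====
-- pass-1 body of B: record a length-k shingle on first sight
def msScanB (k : Int) (p : PySem.Set String × List String) (sh : String) : PySem.Set String × List String :=
  if PySem.Str.len sh == k && !(PySem.Set.contains p.1 sh) then (PySem.Set.add p.1 sh, p.2 ++ [sh]) else p

def make_shingles_alt (doc : String) (shingles : List (String × List Int)) (k : Int) (docid : Int) : List (String × List Int) :=
  let doc2 := PySem.Str.join "" ((PySem.Str.split? (PySem.Str.lower doc) " ").getD [])   -- sep " " ≠ "" so split? is never none
  let scan := (PySem.List.pyRange 0 (PySem.Str.len doc2) 1).foldl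
      (fun p i => msScanB k p (PySem.Str.slice doc2 (some i) (some (i + k))))
      (PySem.Set.empty, [])
  let seen := scan.1
  let distinct := scan.2
  let d0 : PySem.Dict String (List Int) := PySem.Dict.mk shingles
  -- pass 2: dict comprehension over the old entries …
  let result : PySem.Dict String (List Int) := PySem.Dict.mk (d0.items.map
      (fun kv => if PySem.Set.contains seen kv.1 && !(kv.2.contains docid)
                 then (kv.1, kv.2 ++ [docid]) else kv))
  -- … then the brand-new shingles appended
  (distinct.foldl (fun d sh => if !(d0.contains sh) then d.insert sh [docid] else d) result).items

-- ===== PRECONDITION & SPEC =====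
-- Pre_ requires the association list to have distinct keys: only such lists represent a Python
-- dict (the type of A's `shingles` argument); a duplicate-key list is no dict at all.
def Pre_make_shingles (doc : String) (shingles : List (String × List Int)) (k : Int) (docid : Int) : Prop :=
  (shingles.map Prod.fst).Nodup
instance (doc : String) (shingles : List (String × List Int)) (k : Int) (docid : Int) : Decidable (Pre_make_shingles doc shingles k docid) := by unfold Pre_make_shingles; infer_instance

def pvWitness_make_shingles : String × (List (String × List Int)) × Int × Int :=
  ("aB ba", [("ab", [1]), ("zz", [2])], 2, 3)

def Spec_make_shingles (doc : String) (shingles : List (String × List Int)) (k : Int) (docid : Int) (out : List (String × List Int)) : Prop := out = make_shingles_alt doc shingles k docid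
instance (doc : String) (shingles : List (String × List Int)) (k : Int) (docid : Int) (out : List (String × List Int)) : Decidable (Spec_make_shingles doc shingles k docid out) := by unfold Spec_make_shingles; infer_instance

-- ===== CLAIM (what is proved, stated in full; the proofs are below) =====
def Claim_equal_make_shingles : Prop := ∀ (doc : String) (shingles : List (String × List Int)) (k : Int) (docid : Int), Dom_make_shingles doc shingles k docid → Pre_make_shingles doc shingles k docid → Spec_make_shingles doc shingles k docid (make_shingles doc shingles k docid)

-- ===== LEMMAS AND PROOFS =====

-- proof-side form of A's update at a length-k shingle
def updB (docid : Int) (d : PySem.Dict String (List Int)) (sh : String) : PySem.Dict String (List Int) :=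
  if !(d.contains sh) then
    d.insert sh [docid]
  else
    let postinglist := d.getD sh []
    if !(postinglist.contains docid) then d.insert sh (postinglist ++ [docid]) else d

-- the new distinct length-k shingles of the candidate list, given the shingles already seen
def distinctNew (k : Int) : List String → PySem.Set String → List String
  | [], _ => []
  | x :: xs, s =>
      if PySem.Str.len x == k && !(PySem.Set.contains s x) then x :: distinctNew k xs (PySem.Set.add s x)
      else distinctNew k xs s

-- invariant: the dict maps `s` to a posting list containing `docid`
def hasId (docid : Int) (d : PySem.Dict String (List Int)) (s : String) : Prop :=
  d.contains s = true ∧ docid ∈ d.getD s []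

-- A's body is updB guarded by the length test
theorem msStepA_eq (k docid : Int) (d : PySem.Dict String (List Int)) (sh : String) :
    msStepA k docid d sh = if (PySem.Str.len sh == k) then updB docid d sh else d := by
  unfold msStepA updB
  by_cases h : (PySem.Str.len sh == k) = true <;>
    by_cases hc : d.contains sh = true <;> simp_all

-- B's pass-1 scan computes the new distinct length-k shingles (as seen-set and as list)
theorem scan_spec (k : Int) : ∀ (xs : List String) (s : PySem.Set String) (l : List String),
    xs.foldl (msScanB k) (s, l) = (s ++ distinctNew k xs s, l ++ distinctNew k xs s) := by
  intro xs
  induction xs with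
  | nil => intro s l; simp [distinctNew]
  | cons x t ih =>
    intro s l
    by_cases h : (PySem.Str.len x == k && !(PySem.Set.contains s x)) = true
    · have h' := h
      simp at h'
      have hx : x ∉ s := h'.2
      have hstep : msScanB k (s, l) x = (PySem.Set.add s x, l ++ [x]) := by
        simp [msScanB, h'.1, hx]
      rw [List.foldl_cons, hstep, ih, distinctNew, PySem.Set.add_of_not_mem hx]
      simp [h'.1, hx]
    · have hf : (PySem.Str.len x == k && !(PySem.Set.contains s x)) = false := by
        simpa using h
      have h' := hf
      simp at h'
      have hstep : msScanB k (s, l) x = (s, l) := by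
        simp only [msScanB]
        rw [if_neg]
        simpa using h'
      rw [List.foldl_cons, hstep, ih, distinctNew, if_neg (by simpa using h')]

theorem distinctNew_nodup (k : Int) : ∀ (xs : List String) (s : PySem.Set String),
    (distinctNew k xs s).Nodup ∧ ∀ y ∈ distinctNew k xs s, y ∉ s := by
  intro xs
  induction xs with
  | nil => intro s; simp [distinctNew]
  | cons x t ih =>
    intro s
    rw [distinctNew]
    by_cases h : (PySem.Str.len x == k && !(PySem.Set.contains s x)) = true
    · have h' := h
      simp at h'
      have hx : x ∉ s := h'.2
      obtain ⟨hnd, hmem⟩ := ih (PySem.Set.add s x)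
      rw [if_pos (by simpa using h')]
      constructor
      · exact List.nodup_cons.mpr ⟨fun hxin => (hmem x hxin) (by simp [PySem.Set.mem_add]), hnd⟩
      · intro y hy
        rcases List.mem_cons.mp hy with rfl | hy'
        · exact hx
        · intro hys; exact (hmem y hy') (by simp [PySem.Set.mem_add, hys])
    · obtain ⟨hnd, hmem⟩ := ih s
      rw [if_neg (by simpa using (by simpa using h : _))]
      exact ⟨hnd, hmem⟩

theorem hasId_upd_self (docid : Int) (d : PySem.Dict String (List Int)) (s : String) :
    hasId docid (updB docid d s) s := by
  unfold updB hasId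
  by_cases hc : d.contains s = true
  · by_cases hm : docid ∈ d.getD s []
    · simp [hc, hm]
    · simp [hc, hm, PySem.Dict.contains_insert_self, PySem.Dict.getD_insert_self]
  · simp [hc, PySem.Dict.contains_insert_self, PySem.Dict.getD_insert_self]

theorem hasId_upd_mono (docid : Int) (d : PySem.Dict String (List Int)) (s t : String)
    (h : hasId docid d s) : hasId docid (updB docid d t) s := by
  by_cases hst : s = t
  · subst hst; exact hasId_upd_self docid d s
  · obtain ⟨hc, hm⟩ := h
    unfold updB hasId
    by_cases hct : d.contains t = true
    · by_cases hmt : docid ∈ d.getD t []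
      · simp [hct, hmt, hc, hm]
      · simp [hct, hmt, PySem.Dict.contains_insert,
          PySem.Dict.getD_insert_of_ne _ _ _ hst, hc, hm]
    · simp [hct, PySem.Dict.contains_insert,
        PySem.Dict.getD_insert_of_ne _ _ _ hst, hc, hm]

theorem upd_noop (docid : Int) (d : PySem.Dict String (List Int)) (s : String)
    (h : hasId docid d s) : updB docid d s = d := by
  obtain ⟨hc, hm⟩ := h
  unfold updB
  simp [hc, hm]

-- A's scan from a seen-set s equals updB folded over the new distinct shingles
theorem A_fold_eq (k docid : Int) : ∀ (xs : List String) (s : PySem.Set String)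
    (d : PySem.Dict String (List Int)), (∀ x ∈ s, hasId docid d x) →
    xs.foldl (msStepA k docid) d = (distinctNew k xs s).foldl (updB docid) d := by
  intro xs
  induction xs with
  | nil => intro s d _; simp [distinctNew]
  | cons x t ih =>
    intro s d hinv
    rw [List.foldl_cons, msStepA_eq, distinctNew]
    by_cases hk : (PySem.Str.len x == k) = true
    · by_cases hs : x ∈ s
      · rw [if_pos hk, upd_noop docid d x (hinv x hs), if_neg (by simp [hs]), ih s d hinv]
      · rw [if_pos hk, if_pos (by simp [hs, (by simpa using hk : (x.length : Int) = k)]),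
          List.foldl_cons]
        refine ih (PySem.Set.add s x) (updB docid d x) ?_
        intro y hy
        rcases (PySem.Set.mem_add s x y).mp hy with hy' | rfl
        · exact hasId_upd_mono docid d y x (hinv y hy')
        · exact hasId_upd_self docid d y
    · rw [if_neg hk, if_neg (fun hcon => hk ((Bool.and_eq_true _ _ |>.mp hcon).1)), ih s d hinv]

-- folding updB over a duplicate-free shingle list = rebuild the items functionally
theorem fold_updB_items (docid : Int) : ∀ (ds : List String) (d : PySem.Dict String (List Int)),
    ds.Nodup → d.keys.Nodup →
    (ds.foldl (updB docid) d).items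
      = d.items.map (fun kv => if ds.contains kv.1 && !(kv.2.contains docid)
                               then (kv.1, kv.2 ++ [docid]) else kv)
        ++ (ds.filter (fun sh => !(d.contains sh))).map (fun sh => (sh, [docid])) := by
  intro ds
  induction ds with
  | nil =>
    intro d _ _
    simp
  | cons x t ih =>
    intro d hnd hkeys
    have hxt : x ∉ t := (List.nodup_cons.mp hnd).1
    have hnt : t.Nodup := (List.nodup_cons.mp hnd).2
    rw [List.foldl_cons]
    by_cases hc : d.contains x = true
    · by_cases hm : docid ∈ d.getD x []
      · -- no-op step
        have hstep : updB docid d x = d := by unfold updB; simp [hc, hm]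
        rw [hstep, ih d hnt hkeys]
        congr 1
        · refine List.map_congr_left (fun kv hkv => ?_)
          by_cases hkx : kv.1 = x
          · have hv : d.getD kv.1 [] = kv.2 :=
              PySem.Dict.getD_of_mem_items d (by simpa using hkv) hkeys []
            have hmem2 : docid ∈ kv.2 := by rw [← hv, hkx]; exact hm
            simp [hkx, hxt, hmem2]
          · simp [hkx]
        · rw [List.filter_cons]
          simp [hc]
      · -- append docid to x's posting list
        have hstep : updB docid d x = d.insert x (d.getD x [] ++ [docid]) := by
          unfold updB
          simp [hc, hm]
        have hkeys' : (d.insert x (d.getD x [] ++ [docid])).keys.Nodup :=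
          PySem.Dict.nodup_keys_insert d x _ hkeys
        rw [hstep, ih _ hnt hkeys']
        have hitems := PySem.Dict.items_insert_of_contains d (d.getD x [] ++ [docid]) hc
        rw [hitems,
          show List.filter (fun sh => !d.contains sh) (x :: t)
              = List.filter (fun sh => !d.contains sh) t by
            rw [List.filter_cons]; simp [hc]]
        congr 1
        · rw [List.map_map]
          refine List.map_congr_left (fun kv hkv => ?_)
          by_cases hkx : kv.1 = x
          · have hv : d.getD kv.1 [] = kv.2 :=
              PySem.Dict.getD_of_mem_items d (by simpa using hkv) hkeys []
            have hmc : docid ∉ kv.2 := by rw [← hv, hkx]; exact hm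
            simp [Function.comp, hkx, hxt, hmc]
            rw [← hkx]; exact hv
          · simp [Function.comp, hkx]
        · congr 1
          refine List.filter_congr (fun sh hsh => ?_)
          have hshx : sh ≠ x := fun h => hxt (h ▸ hsh)
          rw [PySem.Dict.contains_insert]
          simp [hshx]

    · -- new shingle: fresh insert
      have hstep : updB docid d x = d.insert x [docid] := by
        unfold updB; simp [hc]
      have hkeys' : (d.insert x [docid]).keys.Nodup := PySem.Dict.nodup_keys_insert d x _ hkeys
      rw [hstep, ih _ hnt hkeys']
      rw [PySem.Dict.items_insert_of_not_contains d [docid] (by simpa using hc)]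
      rw [List.map_append]
      have hxkeys : x ∉ d.keys := fun hmem => hc ((PySem.Dict.contains_iff_mem_keys d x).mpr hmem)
      have hmap : (d.items.map (fun kv => if t.contains kv.1 && !(kv.2.contains docid)
                               then (kv.1, kv.2 ++ [docid]) else kv))
          = d.items.map (fun kv => if (x :: t).contains kv.1 && !(kv.2.contains docid)
                               then (kv.1, kv.2 ++ [docid]) else kv) := by
        refine List.map_congr_left (fun kv hkv => ?_)
        have hkx : kv.1 ≠ x := by
          intro h
          exact hxkeys (h ▸ PySem.Dict.mem_keys_of_mem_items d hkv)
        simp [hkx]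
      have hfilter : t.filter (fun sh => !((d.insert x [docid]).contains sh))
          = t.filter (fun sh => !(d.contains sh)) := by
        refine List.filter_congr (fun sh hsh => ?_)
        have hshx : sh ≠ x := fun h => hxt (h ▸ hsh)
        rw [PySem.Dict.contains_insert]
        simp [hshx]
      rw [hfilter, hmap]
      have hxfil : (x :: t).filter (fun sh => !(d.contains sh))
          = x :: t.filter (fun sh => !(d.contains sh)) := by
        rw [List.filter_cons, if_pos (by simp [hc])]
      rw [hxfil]
      simp [List.map_cons, List.append_assoc, hxt]

-- fresh-key insertion loop appends (instance of PySem.Dict.items_foldl_insert_fresh)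
theorem items_fold_insert (docid : Int) (l : List String) (d : PySem.Dict String (List Int))
    (h1 : ∀ a ∈ l, d.contains a = false) (h2 : l.Nodup) :
    (l.foldl (fun d sh => d.insert sh [docid]) d).items = d.items ++ l.map (fun sh => (sh, [docid])) := by
  simpa using PySem.Dict.items_foldl_insert_fresh l (fun a => a) (fun _ => [docid]) d h1 (by simpa using h2)

-- ===== VERDICT (by name: the statement is the Claim_ definition above) =====
theorem make_shingles_spec : Claim_equal_make_shingles := by
  intro doc shingles k docid _ hpre
  unfold Spec_make_shingles
  simp only [make_shingles, make_shingles_alt]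
  generalize (PySem.Str.join "" ((PySem.Str.split? (PySem.Str.lower doc) " ").getD [])) = doc2
  rw [← List.foldl_map (f := fun i => PySem.Str.slice doc2 (some i) (some (i + k)))
        (g := msStepA k docid),
      ← List.foldl_map (f := fun i => PySem.Str.slice doc2 (some i) (some (i + k)))
        (g := msScanB k)]
  generalize ((PySem.List.pyRange 0 (PySem.Str.len doc2) 1).map
      (fun i => PySem.Str.slice doc2 (some i) (some (i + k)))) = cand
  set d0 : PySem.Dict String (List Int) := PySem.Dict.mk shingles with hd0
  set D := distinctNew k cand PySem.Set.empty with hD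
  have hkeys0 : d0.keys.Nodup := by
    simpa [hd0, PySem.Dict.keys] using hpre
  obtain ⟨hDnd, _⟩ := distinctNew_nodup k cand PySem.Set.empty
  -- A side: fold over the candidates = updB over the distinct shingles, then rebuild
  rw [A_fold_eq k docid cand PySem.Set.empty d0
        (by intro x hx; simp [PySem.Set.empty] at hx),
      fold_updB_items docid D d0 hDnd hkeys0]
  -- B side: pass 1 computes exactly D …
  rw [scan_spec k cand PySem.Set.empty []]
  have hnil : ((PySem.Set.empty : PySem.Set String) ++ D, ([] : List String) ++ D) = (D, D) := by
    simp [PySem.Set.empty]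
  rw [hnil]
  dsimp only
  -- … and pass 2 appends the fresh shingles to the rebuilt entries
  rw [PySem.List.foldl_if_eq_foldl_filter (fun sh => !(d0.contains sh))
        (fun (d : PySem.Dict String (List Int)) sh => d.insert sh [docid]) D]
  have hfresh : ∀ a ∈ D.filter (fun sh => !(d0.contains sh)),
      (PySem.Dict.mk (d0.items.map
        (fun kv => if PySem.Set.contains D kv.1 && !(kv.2.contains docid)
                   then (kv.1, kv.2 ++ [docid]) else kv))).contains a = false := by
    intro a ha
    have hnc : d0.contains a = false := by
      have := List.of_mem_filter ha
      simpa using this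
    rw [PySem.Dict.contains_mk, List.any_map]
    simp only [Function.comp_def]
    have hcg : ∀ p ∈ d0.items,
        (((fun kv => if PySem.Set.contains D kv.1 && !(kv.2.contains docid)
                     then (kv.1, kv.2 ++ [docid]) else kv) p).1 == a) = (p.1 == a) := by
      intro p _
      dsimp only
      by_cases hcond : (PySem.Set.contains D p.1 && !(p.2.contains docid)) = true
      · rw [if_pos hcond]
      · rw [if_neg hcond]
    rw [PySem.List.any_congr_mem hcg]
    simpa [hd0, PySem.Dict.contains_mk] using hnc
  rw [items_fold_insert docid _ _ hfresh (List.Nodup.filter _ hDnd)]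
  dsimp only
  congr 1
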